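-- pv_equiv track=rewrite | github.com/joninet/Itec | Primer Año/Programacion1/0-Practicos/Practico_5/Nuevo/funciones_new.py | contar_ocurrencias_pais
-- ===== SOURCE A (Python) =====
-- def contar_ocurrencias_pais(lista_personas, pais_buscar):
--     contador = 0
--     pais_buscar=pais_buscar.capitalize()
--     for persona in lista_personas:
--         pais = persona.split(",")[1]
--         if pais == pais_buscar:
--             contador += 1
--
--     if contador > 0:
--         resultado = f"El país {pais_buscar} tiene {contador} personas."
--     else:
--         resultado = f"No se encontró el país {pais_buscar}."
--
--     return resultado
-- ===== SOURCE B (Python) =====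
-- def _cuenta_pais(lista_personas, pais_buscar):
--     if not lista_personas:
--         return 0
--     resto = _cuenta_pais(lista_personas[1:], pais_buscar)
--     if lista_personas[0].split(",")[1] == pais_buscar:
--         return 1 + resto
--     return resto
--
--
-- def contar_ocurrencias_pais(lista_personas, pais_buscar):
--     pais_buscar = pais_buscar.capitalize()
--     contador = _cuenta_pais(lista_personas, pais_buscar)
--     if contador > 0:
--         return f"El país {pais_buscar} tiene {contador} personas."
--     return f"No se encontró el país {pais_buscar}."
-- ===== Notes on version B (the rewrite author's own statement) =====
-- stated objective: alternative
-- what changed: B replaces A's iterative loop with a scalar accumulator by a structural recursion on the list: a helper recurses on the tail first and adds 1 on the way back up when the head's country matches, and the caller only formats the message.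
import Mathlib
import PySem

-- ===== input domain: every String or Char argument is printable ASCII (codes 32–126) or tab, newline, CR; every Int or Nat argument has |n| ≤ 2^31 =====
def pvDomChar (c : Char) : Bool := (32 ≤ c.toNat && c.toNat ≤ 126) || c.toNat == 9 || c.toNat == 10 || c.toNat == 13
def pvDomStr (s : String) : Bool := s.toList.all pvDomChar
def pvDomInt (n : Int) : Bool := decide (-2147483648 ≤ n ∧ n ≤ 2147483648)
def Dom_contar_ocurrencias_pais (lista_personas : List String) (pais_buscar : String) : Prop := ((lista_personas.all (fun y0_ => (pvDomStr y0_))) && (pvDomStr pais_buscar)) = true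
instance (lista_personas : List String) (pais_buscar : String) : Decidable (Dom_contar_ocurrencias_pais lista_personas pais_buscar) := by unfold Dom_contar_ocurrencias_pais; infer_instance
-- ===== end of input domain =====

-- B replaces A's iterative loop with a running counter by a structural recursion on the
-- list (count the tail, add 1 on the way back up when the head matches); same cost,
-- return value proved equal.

-- shared helper: Python's str.capitalize() (exact on the ASCII domain: first char uppercased,
-- the rest lowercased); PySem has no capitalize primitive, so it is ported by hand here.
def pyCapitalize (s : String) : String :=
  match s.toList with
  | [] => s
  | c :: rest => String.ofList (PySem.Chars.upperChar c :: PySem.Chars.lower rest)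

-- ===== PORT A =====
def contar_ocurrencias_pais (lista_personas : List String) (pais_buscar : String) : String :=
  let pais_buscar := pyCapitalize pais_buscar
  let contador : Int := lista_personas.foldl (fun contador persona =>
    let pais := PySem.List.pyGetD ((PySem.Str.split? persona ",").getD []) 1 ""
    if pais == pais_buscar then contador + 1 else contador) 0
  if contador > 0 then
    PySem.Str.join "" ["El país ", pais_buscar, " tiene ", PySem.Int.toStr contador, " personas."]
  else
    PySem.Str.join "" ["No se encontró el país ", pais_buscar, "."]

-- ===== PORT B =====
-- recursive helper _cuenta_pais: lista_personas[0] is the head, lista_personas[1:] the tail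
def pvCuentaPais (lista_personas : List String) (pais_buscar : String) : Int :=
  match lista_personas with
  | [] => 0
  | cabeza :: cola =>
    let resto := pvCuentaPais cola pais_buscar
    if PySem.List.pyGetD ((PySem.Str.split? cabeza ",").getD []) 1 "" == pais_buscar then
      1 + resto
    else
      resto

def contar_ocurrencias_pais_alt (lista_personas : List String) (pais_buscar : String) : String :=
  let pais_buscar := pyCapitalize pais_buscar
  let contador : Int := pvCuentaPais lista_personas pais_buscar
  if contador > 0 then
    PySem.Str.join "" ["El país ", pais_buscar, " tiene ", PySem.Int.toStr contador, " personas."]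
  else
    PySem.Str.join "" ["No se encontró el país ", pais_buscar, "."]

-- ===== PRECONDITION & SPEC =====
-- Pre_ excludes exactly the inputs where A raises: a persona without a comma makes
-- persona.split(",")[1] an IndexError in Python (B raises there too).
def Pre_contar_ocurrencias_pais (lista_personas : List String) (pais_buscar : String) : Prop :=
  (lista_personas.all (fun persona => PySem.Str.isIn "," persona)) = true
instance (lista_personas : List String) (pais_buscar : String) : Decidable (Pre_contar_ocurrencias_pais lista_personas pais_buscar) := by unfold Pre_contar_ocurrencias_pais; infer_instance

def pvWitness_contar_ocurrencias_pais : List String × String := (["Ana,Peru", "Bob,Chile", "Eva,Peru"], "peru")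

def Spec_contar_ocurrencias_pais (lista_personas : List String) (pais_buscar : String) (out : String) : Prop := out = contar_ocurrencias_pais_alt lista_personas pais_buscar
instance (lista_personas : List String) (pais_buscar : String) (out : String) : Decidable (Spec_contar_ocurrencias_pais lista_personas pais_buscar out) := by unfold Spec_contar_ocurrencias_pais; infer_instance

-- ===== CLAIM (what is proved, stated in full; the proofs are below) =====
def Claim_equal_contar_ocurrencias_pais : Prop := ∀ (lista_personas : List String) (pais_buscar : String), Dom_contar_ocurrencias_pais lista_personas pais_buscar → Pre_contar_ocurrencias_pais lista_personas pais_buscar → Spec_contar_ocurrencias_pais lista_personas pais_buscar (contar_ocurrencias_pais lista_personas pais_buscar)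

-- ===== LEMMAS AND PROOFS =====

-- A's left-fold counter equals B's structural recursion (generalised over the accumulator).
theorem foldl_count_eq_cuenta (pb : String) (l : List String) (c : Int) :
    l.foldl (fun c p =>
      if PySem.List.pyGetD ((PySem.Str.split? p ",").getD []) 1 "" == pb then c + 1 else c) c
    = c + pvCuentaPais l pb := by
  induction l generalizing c with
  | nil => simp [pvCuentaPais]
  | cons p rest ih =>
    simp only [List.foldl_cons, pvCuentaPais]
    split_ifs with h
    · rw [ih]; ring
    · rw [ih]

-- ===== VERDICT (by name: the statement is the Claim_ definition above) =====
theorem contar_ocurrencias_pais_spec : Claim_equal_contar_ocurrencias_pais := by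
  intro lista_personas pais_buscar _ _
  unfold Spec_contar_ocurrencias_pais contar_ocurrencias_pais contar_ocurrencias_pais_alt
  dsimp only
  rw [foldl_count_eq_cuenta (pyCapitalize pais_buscar) lista_personas 0, zero_add]
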